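-- pv_equiv track=rewrite | github.com/cosmax2018/utils | system/estrai_diff_reg.py | estrai_blocchi
-- ===== SOURCE A (Python) =====
-- def estrai_blocchi(lines):
--     """
--     Divide il file .reg in blocchi:
--     ogni chiave [HKEY_...] e i suoi valori associati
--     """
--     blocchi = {}
--     current_key = None
--     current_values = []
--
--     for line in lines:
--         if line.startswith("[HKEY_"):
--             if current_key:
--                 blocchi[current_key] = current_values
--             current_key = line.strip()
--             current_values = []
--         elif current_key:
--             current_values.append(line.strip())
--     if current_key:
--         blocchi[current_key] = current_values
--
--     return blocchi
-- ===== SOURCE B (Python) =====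
-- def estrai_blocchi(lines):
--     """
--     Divide il file .reg in blocchi:
--     ogni chiave [HKEY_...] e i suoi valori associati
--     """
--     lines = list(lines)
--
--     def next_header(i):
--         """index of the first [HKEY_ header line at or after i"""
--         while i < len(lines) and not lines[i].startswith("[HKEY_"):
--             i += 1
--         return i
--
--     blocchi = {}
--     i = next_header(0)
--     while i < len(lines):
--         j = next_header(i + 1)
--         blocchi[lines[i].strip()] = [l.strip() for l in lines[i + 1:j]]
--         i = j
--     return blocchi
-- ===== Notes on version B (the rewrite author's own statement) =====
-- stated objective: alternative
-- what changed: Replaces A's accumulate-and-flush state machine (current_key/current_values carried through one loop with a final flush) by a boundary-finding decomposition: materialize the lines, jump from header index to next header index and slice-and-strip the segment between them as the block's values.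
import Mathlib
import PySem

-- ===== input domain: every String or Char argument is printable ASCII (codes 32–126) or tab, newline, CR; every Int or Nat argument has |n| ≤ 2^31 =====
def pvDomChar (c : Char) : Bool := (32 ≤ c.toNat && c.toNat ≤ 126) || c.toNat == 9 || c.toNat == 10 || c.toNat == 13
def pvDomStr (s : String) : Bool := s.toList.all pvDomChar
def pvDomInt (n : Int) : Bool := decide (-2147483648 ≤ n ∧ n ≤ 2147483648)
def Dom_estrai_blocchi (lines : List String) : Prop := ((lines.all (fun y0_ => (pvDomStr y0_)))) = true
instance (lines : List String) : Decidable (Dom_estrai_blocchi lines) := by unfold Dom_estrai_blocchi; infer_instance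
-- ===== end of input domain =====

-- B replaces A's accumulate-and-flush state machine by a boundary-finding decomposition
-- (find each header, slice-and-strip the segment up to the next header): an alternative of the same cost.


-- ===== PORT A =====
-- Python truthiness of `current_key` (None or a str): false for None and for the empty string.
def pvTruthyStr : Option String → Bool
  | none => false
  | some s => decide (s ≠ "")

-- one iteration of A's `for line in lines` loop; state = (blocchi, current_key, current_values)
def pvAStep (st : PySem.Dict String (List String) × Option String × List String) (line : String) :
    PySem.Dict String (List String) × Option String × List String :=
  match st with
  | (d, ck, vs) =>
    if PySem.Str.startswith line "[HKEY_" then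
      (if pvTruthyStr ck then d.insert (ck.getD "") vs else d, some (PySem.Str.strip line), [])
    else
      if pvTruthyStr ck then (d, ck, vs ++ [PySem.Str.strip line]) else (d, ck, vs)

def estrai_blocchi (lines : List String) : List (String × List String) :=
  let st := lines.foldl pvAStep (PySem.Dict.empty, none, [])
  (if pvTruthyStr st.2.1 then st.1.insert (st.2.1.getD "") st.2.2 else st.1).items

-- ===== PORT B =====
def pvIsHeader (l : String) : Bool := PySem.Str.startswith l "[HKEY_"

-- Source B's second while loop: `rest` is the suffix of `lines` from the current header index i on;
-- `next_header(i+1)` + the slice `lines[i+1:j]` are rendered on that suffix as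
-- takeWhile/dropWhile of not-a-header (exact: same boundary, same segment).
def pvBLoop : PySem.Dict String (List String) → List String → PySem.Dict String (List String)
  | d, [] => d
  | d, h :: t =>
      pvBLoop (d.insert (PySem.Str.strip h)
                ((t.takeWhile (fun l => !pvIsHeader l)).map PySem.Str.strip))
             (t.dropWhile (fun l => !pvIsHeader l))
termination_by _ l => l.length
decreasing_by simpa using Nat.lt_succ_of_le (List.length_dropWhile_le _ t)

-- Source B: `i = next_header(0)` = drop the prefix before the first header, then the while loop.
def estrai_blocchi_alt (lines : List String) : List (String × List String) :=
  (pvBLoop PySem.Dict.empty (lines.dropWhile (fun l => !pvIsHeader l))).items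

-- ===== PRECONDITION & SPEC =====
def Spec_estrai_blocchi (lines : List String) (out : List (String × List String)) : Prop := out = estrai_blocchi_alt lines
instance (lines : List String) (out : List (String × List String)) : Decidable (Spec_estrai_blocchi lines out) := by unfold Spec_estrai_blocchi; infer_instance

-- ===== CLAIM (what is proved, stated in full; the proofs are below) =====
def Claim_equal_estrai_blocchi : Prop := ∀ (lines : List String), Dom_estrai_blocchi lines → Spec_estrai_blocchi lines (estrai_blocchi lines)

-- ===== LEMMAS AND PROOFS =====

-- the stripped header line is nonempty (it contains '[', which is not whitespace)
theorem pv_strip_header_ne (l : String) (h : PySem.Str.startswith l "[HKEY_" = true) :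
    PySem.Str.strip l ≠ "" := by
  intro he
  have hp : ("[HKEY_".toList) <+: l.toList := by
    rw [PySem.Str.startswith_eq] at h
    exact (PySem.Chars.startswith_iff _ _).mp h
  have hmem : '[' ∈ l.toList := hp.mem (by simp)
  have ht : (PySem.Str.strip l).toList = [] := by rw [he]; rfl
  rw [PySem.Str.toList_strip] at ht
  unfold PySem.Chars.strip PySem.Chars.rstrip PySem.Chars.lstrip at ht
  have h1 := List.reverse_eq_nil_iff.mp ht
  rw [List.dropWhile_eq_nil_iff] at h1
  have hsp : PySem.Chars.isspace '[' = false := by decide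
  have hmem2 : '[' ∈ List.dropWhile PySem.Chars.isspace l.toList := by
    rcases (List.mem_append.mp (by
      rw [List.takeWhile_append_dropWhile]; exact hmem :
        '[' ∈ List.takeWhile PySem.Chars.isspace l.toList ++ List.dropWhile PySem.Chars.isspace l.toList)) with h | h
    · exact absurd (List.mem_takeWhile_imp h) (by simp [hsp])
    · exact h
  have := h1 '[' (List.mem_reverse.mpr hmem2)
  simp [hsp] at this

-- the flush at the end of A, as a function of the loop state
def pvAFin (st : PySem.Dict String (List String) × Option String × List String) :
    PySem.Dict String (List String) :=
  if pvTruthyStr st.2.1 then st.1.insert (st.2.1.getD "") st.2.2 else st.1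

-- running A's loop from a live key k equals B's loop after inserting k with the segment's values
theorem pv_fold_some (lines : List String) : ∀ (d : PySem.Dict String (List String))
    (k : String) (vs : List String), k ≠ "" →
    pvAFin (lines.foldl pvAStep (d, some k, vs)) =
    pvBLoop (d.insert k (vs ++ (lines.takeWhile (fun l => !pvIsHeader l)).map PySem.Str.strip))
      (lines.dropWhile (fun l => !pvIsHeader l)) := by
  induction lines with
  | nil => intro d k vs hk; simp [pvAFin, pvTruthyStr, hk, pvBLoop]
  | cons l t ih =>
    intro d k vs hk
    by_cases hl : pvIsHeader l = true
    · have hs := pv_strip_header_ne l hl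
      unfold pvIsHeader at hl
      have hlc : PySem.Chars.startswith l.toList ['[','H','K','E','Y','_'] = true := by
        have h2 := hl; rw [PySem.Str.startswith_eq] at h2; simpa using h2
      rw [List.foldl_cons]
      have hstep : pvAStep (d, some k, vs) l = (d.insert k vs, some (PySem.Str.strip l), []) := by
        simp [pvAStep, hlc, pvTruthyStr, hk]
      rw [hstep, ih _ _ _ hs]
      rw [List.takeWhile_cons, List.dropWhile_cons]
      simp [pvIsHeader, hlc, pvBLoop]
    · have hl' : pvIsHeader l = false := by simpa using hl
      unfold pvIsHeader at hl'
      have hlc : PySem.Chars.startswith l.toList ['[','H','K','E','Y','_'] = false := by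
        have h2 := hl'; rw [PySem.Str.startswith_eq] at h2; simpa using h2
      rw [List.foldl_cons]
      have hstep : pvAStep (d, some k, vs) l = (d, some k, vs ++ [PySem.Str.strip l]) := by
        simp [pvAStep, hlc, pvTruthyStr, hk]
      rw [hstep, ih _ _ _ hk]
      rw [List.takeWhile_cons, List.dropWhile_cons]
      simp [pvIsHeader, hlc]

-- before the first header A's loop is a no-op on the state
theorem pv_fold_none (lines : List String) : ∀ (d : PySem.Dict String (List String)),
    pvAFin (lines.foldl pvAStep (d, none, [])) =
    pvBLoop d (lines.dropWhile (fun l => !pvIsHeader l)) := by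
  induction lines with
  | nil => intro d; simp [pvAFin, pvTruthyStr, pvBLoop]
  | cons l t ih =>
    intro d
    by_cases hl : pvIsHeader l = true
    · have hs := pv_strip_header_ne l hl
      unfold pvIsHeader at hl
      have hlc : PySem.Chars.startswith l.toList ['[','H','K','E','Y','_'] = true := by
        have h2 := hl; rw [PySem.Str.startswith_eq] at h2; simpa using h2
      rw [List.foldl_cons]
      have hstep : pvAStep (d, none, []) l = (d, some (PySem.Str.strip l), []) := by
        simp [pvAStep, hlc, pvTruthyStr]
      rw [hstep, pv_fold_some t _ _ _ hs]
      rw [List.dropWhile_cons]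
      simp [pvIsHeader, hlc, pvBLoop]
    · have hl' : pvIsHeader l = false := by simpa using hl
      unfold pvIsHeader at hl'
      have hlc : PySem.Chars.startswith l.toList ['[','H','K','E','Y','_'] = false := by
        have h2 := hl'; rw [PySem.Str.startswith_eq] at h2; simpa using h2
      rw [List.foldl_cons]
      have hstep : pvAStep (d, none, []) l = (d, none, []) := by
        simp [pvAStep, hlc, pvTruthyStr]
      rw [hstep, ih]
      rw [List.dropWhile_cons]
      simp [pvIsHeader, hlc]

-- ===== VERDICT (by name: the statement is the Claim_ definition above) =====
theorem estrai_blocchi_spec : Claim_equal_estrai_blocchi := by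
  intro lines _
  unfold Spec_estrai_blocchi estrai_blocchi estrai_blocchi_alt
  exact congrArg PySem.Dict.items (pv_fold_none lines PySem.Dict.empty)
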